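-- pv_equiv track=rewrite | github.com/grantleeca/sql-parser | main.py | _decompose_special_characters
-- ===== SOURCE A (Python) =====
-- def _decompose_special_characters(item) -> [str]:
--     result = []
--     current_word = ''
--
--     for c in item:
--         if 0x28 <= ord(c) <= 0x2f or 0x3a < ord(c) <= 0x3f:
--             if len(current_word) > 0:
--                 result.append(current_word)
--                 current_word = ''
--
--             result.append(c)
--         else:
--             current_word += c
--
--     if len(current_word) > 0:
--         result.append(current_word)
--
--     return result
-- ===== SOURCE B (Python) =====
-- _SPECIAL = set('()*+,-./;<=>?')
--
-- def _decompose_special_characters(item) -> [str]: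
--     result = []
--     i, n = 0, len(item)
--     while i < n:
--         if item[i] in _SPECIAL:
--             result.append(item[i])
--             i += 1
--         else:
--             j = i + 1
--             while j < n and item[j] not in _SPECIAL:
--                 j += 1
--             result.append(item[i:j])
--             i = j
--     return result
-- ===== Notes on version B (the rewrite author's own statement) =====
-- stated objective: alternative
-- what changed: B scans by maximal runs: it finds the end of each run of non-special characters with an inner index scan and slices it out in one piece, instead of A's character-by-character accumulator that is flushed when a special character appears.
import Mathlib
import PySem

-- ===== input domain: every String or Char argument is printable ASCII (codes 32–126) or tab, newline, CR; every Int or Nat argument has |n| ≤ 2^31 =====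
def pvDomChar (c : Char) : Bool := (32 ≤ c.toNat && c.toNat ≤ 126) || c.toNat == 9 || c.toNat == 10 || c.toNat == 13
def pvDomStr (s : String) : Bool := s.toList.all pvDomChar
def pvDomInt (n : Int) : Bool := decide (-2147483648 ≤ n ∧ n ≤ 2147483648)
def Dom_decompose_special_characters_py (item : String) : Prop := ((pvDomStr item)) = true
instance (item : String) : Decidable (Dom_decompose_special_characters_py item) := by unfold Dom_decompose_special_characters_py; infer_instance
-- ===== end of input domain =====

-- B splits the string into maximal runs in one pass over runs (takeWhile/dropWhile) instead of
-- A's per-character accumulator flushed at each special character; objective: alternative (same cost).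

-- ===== PORT A =====
-- the special-character test 0x28 <= ord(c) <= 0x2f or 0x3a < ord(c) <= 0x3f
def pvSpecial (c : Char) : Bool := (0x28 ≤ c.toNat && c.toNat ≤ 0x2f) || (0x3a < c.toNat && c.toNat ≤ 0x3f)

-- the for-loop of A as structural recursion over the characters, state = (result, current_word)
def pvGoA : List Char → List String → List Char → List String
  | [], result, cw => if cw.length > 0 then result ++ [String.ofList cw] else result
  | c :: cs, result, cw =>
    if pvSpecial c then
      pvGoA cs ((if cw.length > 0 then result ++ [String.ofList cw] else result) ++ [String.ofList [c]]) []
    else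
      pvGoA cs result (cw ++ [c])

def decompose_special_characters_py (item : String) : List String :=
  pvGoA item.toList [] []

-- ===== PORT B =====
-- B's outer while-loop: emit a special char alone, else slice out the maximal non-special run
-- (the inner index scan j of Source B is the takeWhile/dropWhile pair here)
def pvGoB : List Char → List String
  | [] => []
  | c :: rest =>
    if pvSpecial c then
      String.ofList [c] :: pvGoB rest
    else
      String.ofList (c :: rest.takeWhile (fun d => !pvSpecial d)) ::
        pvGoB (rest.dropWhile (fun d => !pvSpecial d))
termination_by l => l.length
decreasing_by
  · simp
  · have := List.length_dropWhile_le (p := fun d => !pvSpecial d) (l := rest)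
    simp; omega

def decompose_special_characters_py_alt (item : String) : List String :=
  pvGoB item.toList

-- ===== PRECONDITION & SPEC =====
def Spec_decompose_special_characters_py (item : String) (out : List String) : Prop := out = decompose_special_characters_py_alt item
instance (item : String) (out : List String) : Decidable (Spec_decompose_special_characters_py item out) := by unfold Spec_decompose_special_characters_py; infer_instance

-- ===== CLAIM (what is proved, stated in full; the proofs are below) =====
def Claim_equal_decompose_special_characters_py : Prop := ∀ (item : String), Dom_decompose_special_characters_py item → Spec_decompose_special_characters_py item (decompose_special_characters_py item)

-- ===== LEMMAS AND PROOFS =====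

-- A with pending all-non-special word cw and processed prefix res equals res ++ B on cw ++ rest
theorem pvGoA_eq_goB : ∀ (l cw : List Char) (res : List String),
    (∀ c ∈ cw, pvSpecial c = false) →
    pvGoA l res cw = res ++ pvGoB (cw ++ l) := by
  intro l
  induction l with
  | nil =>
    intro cw res h
    match cw with
    | [] => simp [pvGoA, pvGoB]
    | d :: ds =>
      have hd : pvSpecial d = false := h d (by simp)
      have hds : ∀ x ∈ ds, (fun d => !pvSpecial d) x = true := by
        intro x hx; simp [h x (by simp [hx])]
      rw [pvGoB.eq_def]
      simp [pvGoA, hd, List.takeWhile_eq_self_iff.mpr hds,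
        List.dropWhile_eq_nil_iff.mpr (fun x hx => hds x hx), pvGoB]
  | cons c cs ih =>
    intro cw res h
    by_cases hc : pvSpecial c = true
    · have hstep : pvGoB (cw ++ c :: cs) =
          (if cw.length > 0 then [String.ofList cw] else []) ++ String.ofList [c] :: pvGoB cs := by
        match cw with
        | [] => rw [pvGoB.eq_def]; simp [hc]
        | d :: ds =>
          have hd : pvSpecial d = false := h d (by simp)
          have hds : ∀ x ∈ ds, (fun d => !pvSpecial d) x = true := by
            intro x hx; simp [h x (by simp [hx])]
          rw [List.cons_append, pvGoB]
          rw [List.takeWhile_append_of_pos hds, List.dropWhile_append_of_pos hds]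
          rw [pvGoB.eq_def]
          simp only [hd]
          rw [pvGoB.eq_def]
          simp [hc]
      rw [pvGoA]
      simp only [hc, if_true]
      rw [ih [] _ (by simp), hstep]
      by_cases hcw : cw.length > 0 <;> simp [hcw]
    · have hc' : pvSpecial c = false := by simpa using hc
      rw [pvGoA]
      simp only [hc', Bool.false_eq_true, if_false]
      rw [ih (cw ++ [c]) res (by
        intro x hx
        rcases List.mem_append.mp hx with h1 | h1
        · exact h x h1
        · simpa using (by simpa using h1 : x = c) ▸ hc')]
      simp

-- ===== VERDICT (by name: the statement is the Claim_ definition above) =====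
theorem decompose_special_characters_py_spec : Claim_equal_decompose_special_characters_py := by
  intro item _
  unfold Spec_decompose_special_characters_py decompose_special_characters_py decompose_special_characters_py_alt
  simpa using pvGoA_eq_goB item.toList [] [] (by simp)
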